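-- pv_equiv track=rewrite | github.com/aiverify-foundation/moonshot | tests/unit-tests/common/samples/benchmarking-result.py | _get_worst_grade
-- ===== SOURCE A (Python) =====
-- def _get_worst_grade(
--     grading_scale_keys: list[str] | None, grades: list[str]
-- ) -> str:
--     """
--     Determines the worst grade from a list of grades based on a given grading scale.
--
--     The worst grade is the one with the highest rank in the grading scale, where a higher rank
--     means a worse grade. If the grading scale is not provided or a grade is not in the grading scale,
--     a placeholder "-" is returned.
--
--     Args:
--         grading_scale_keys: A list of grade strings ordered from best to worst,
--         or None if no grading scale is provided.
--
--         grades: A list of grade strings to evaluate.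
--
--     Returns:
--         The worst grade string from the list of grades, or "-" if the grading scale is None
--         or a grade is not found in the grading scale.
--     """
--     if grading_scale_keys is None:
--         return "-"  # Return placeholder if grading scale is None
--
--     # Create a reverse mapping from grade to its rank (0 is best, the last index is worst)
--     grade_rank = {grade: rank for rank, grade in enumerate(grading_scale_keys)}
--
--     # Validate that all results are in the grading scale
--     for grade in grades:
--         if grade not in grade_rank:
--             return "-"  # Return placeholder if grade is not in the grading scale
--
--     # Initialize the worst grade with the first result
--     worst_grade = grades[0]
--
--     # Iterate through the results to find the worst grade
--     for grade in grades:
--         if grade_rank[grade] > grade_rank[worst_grade]: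
--             worst_grade = grade
--
--     return worst_grade
-- ===== SOURCE B (Python) =====
-- def _get_worst_grade(
--     grading_scale_keys: list[str] | None, grades: list[str]
-- ) -> str:
--     if grading_scale_keys is None:
--         return "-"
--     grades_set = set(grades)
--     if not grades_set <= set(grading_scale_keys):
--         return "-"
--     # Scale keys are ordered best -> worst: scan from the worst end and
--     # return the first key that actually occurs among the grades.
--     for key in reversed(grading_scale_keys):
--         if key in grades_set:
--             return key
--     return grades[0]  # unreachable for non-empty grades; IndexError on empty, as in the original
-- ===== Notes on version B (the rewrite author's own statement) =====
-- stated objective: alternative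
-- what changed: Instead of building a grade-to-rank dict and folding over grades comparing ranks, B validates with a subset test on sets and scans the grading scale in reverse (worst to best), returning the first key present among the grades.
import Mathlib
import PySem

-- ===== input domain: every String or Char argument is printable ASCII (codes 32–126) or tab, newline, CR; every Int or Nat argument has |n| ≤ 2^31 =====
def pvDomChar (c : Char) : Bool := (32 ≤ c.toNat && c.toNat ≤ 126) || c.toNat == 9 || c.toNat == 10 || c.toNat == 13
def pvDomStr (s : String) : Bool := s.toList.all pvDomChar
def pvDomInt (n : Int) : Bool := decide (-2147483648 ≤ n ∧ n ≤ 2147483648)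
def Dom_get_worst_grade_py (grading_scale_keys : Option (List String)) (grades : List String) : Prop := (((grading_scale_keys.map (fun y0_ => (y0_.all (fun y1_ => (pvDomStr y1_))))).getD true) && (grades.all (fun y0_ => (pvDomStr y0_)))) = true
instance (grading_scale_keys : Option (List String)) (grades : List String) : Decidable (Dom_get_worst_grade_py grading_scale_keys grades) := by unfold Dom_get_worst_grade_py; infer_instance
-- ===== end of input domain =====

-- B re-implements the worst-grade lookup by a subset validation plus a reverse scan of the
-- grading scale, instead of A's rank dict and fold over the grades; same return value on Pre_.

-- ===== PORT A =====
-- A-side helper: grade_rank = {grade: rank for rank, grade in enumerate(grading_scale_keys)}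
def rankDict (ks : List String) : PySem.Dict String Int :=
  (PySem.List.enumerate ks 0).foldl (fun d p => d.insert p.2 p.1) PySem.Dict.empty

def get_worst_grade_py (grading_scale_keys : Option (List String)) (grades : List String) : String :=
  match grading_scale_keys with
  | none => "-"
  | some ks =>
    let grade_rank := rankDict ks
    -- for grade in grades: if grade not in grade_rank: return "-"
    if grades.any (fun g => !(grade_rank.contains g)) then "-"
    else
      -- worst_grade = grades[0]  (IndexError on empty grades; excluded by Pre_)
      let worst₀ := grades.headD ""
      grades.foldl (fun w g => if grade_rank.getD w 0 < grade_rank.getD g 0 then g else w) worst₀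

-- ===== PORT B =====
def get_worst_grade_py_alt (grading_scale_keys : Option (List String)) (grades : List String) : String :=
  match grading_scale_keys with
  | none => "-"
  | some ks =>
    let grades_set := PySem.Set.ofList grades
    if !(PySem.Set.issubset grades_set (PySem.Set.ofList ks)) then "-"
    else
      match ks.reverse.find? (fun k => PySem.Set.contains grades_set k) with
      | some k => k
      | none => grades.headD ""   -- return grades[0]: IndexError on empty grades; excluded by Pre_

-- ===== PRECONDITION & SPEC =====
-- Pre_ excludes only the inputs where A raises IndexError at `grades[0]`: a non-None scale
-- together with an empty grades list (B raises there too).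
def Pre_get_worst_grade_py (grading_scale_keys : Option (List String)) (grades : List String) : Prop :=
  grading_scale_keys = none ∨ grades ≠ []
instance (grading_scale_keys : Option (List String)) (grades : List String) : Decidable (Pre_get_worst_grade_py grading_scale_keys grades) := by unfold Pre_get_worst_grade_py; infer_instance
def pvWitness_get_worst_grade_py : Option (List String) × List String := (some ["A", "B", "C"], ["B", "A", "B"])
def Spec_get_worst_grade_py (grading_scale_keys : Option (List String)) (grades : List String) (out : String) : Prop := out = get_worst_grade_py_alt grading_scale_keys grades
instance (grading_scale_keys : Option (List String)) (grades : List String) (out : String) : Decidable (Spec_get_worst_grade_py grading_scale_keys grades out) := by unfold Spec_get_worst_grade_py; infer_instance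

-- ===== CLAIM (what is proved, stated in full; the proofs are below) =====
def Claim_equal_get_worst_grade_py : Prop := ∀ (grading_scale_keys : Option (List String)) (grades : List String), Dom_get_worst_grade_py grading_scale_keys grades → Pre_get_worst_grade_py grading_scale_keys grades → Spec_get_worst_grade_py grading_scale_keys grades (get_worst_grade_py grading_scale_keys grades)

-- ===== LEMMAS AND PROOFS =====

theorem rankDict_append (ks : List String) (k : String) :
    rankDict (ks ++ [k]) = (rankDict ks).insert k (ks.length : Int) := by
  unfold rankDict
  rw [PySem.List.enumerate_append, List.foldl_append]
  simp [PySem.List.enumerate_cons]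

theorem keys_rankDict (ks : List String) : (rankDict ks).keys = PySem.Set.ofList ks := by
  unfold rankDict
  rw [PySem.Dict.keys_foldl_insert_key (key := Prod.snd) (f := fun d p => p.1)]
  simp [PySem.List.map_snd_enumerate, PySem.Set.update_nil_left, PySem.Dict.keys_empty]

theorem contains_rankDict (ks : List String) (g : String) :
    (rankDict ks).contains g = decide (g ∈ ks) := by
  rw [PySem.Dict.contains_eq_decide_mem_keys, keys_rankDict]
  simp [PySem.Set.mem_ofList]

theorem get?_rankDict_lt (ks : List String) (g : String) (i : Int)
    (h : (rankDict ks).get? g = some i) : 0 ≤ i ∧ i < (ks.length : Int) := by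
  induction ks using List.reverseRecOn generalizing i with
  | nil => simp [rankDict, PySem.List.enumerate_nil, PySem.Dict.get?_empty] at h
  | append_singleton ks k ih =>
    rw [rankDict_append, PySem.Dict.get?_insert] at h
    simp only [List.length_append, List.length_cons, List.length_nil]
    split at h
    · cases h; push_cast; omega
    · rcases ih _ h with ⟨h1, h2⟩; push_cast; omega

theorem fold_invariant (r : String → Int) (l : List String) (w : String) :
    (l.foldl (fun w g => if r w < r g then g else w) w = w ∨
      l.foldl (fun w g => if r w < r g then g else w) w ∈ l) ∧
    r w ≤ r (l.foldl (fun w g => if r w < r g then g else w) w) ∧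
    ∀ g ∈ l, r g ≤ r (l.foldl (fun w g => if r w < r g then g else w) w) := by
  induction l generalizing w with
  | nil => simp
  | cons a t ih =>
    simp only [List.foldl_cons, List.mem_cons]
    by_cases h : r w < r a
    · rw [if_pos h]
      rcases ih a with ⟨hm, hw, hall⟩
      refine ⟨?_, by omega, ?_⟩
      · rcases hm with hm | hm
        · exact Or.inr (Or.inl hm)
        · exact Or.inr (Or.inr hm)
      · rintro g (rfl | hg)
        · exact hw
        · exact hall g hg
    · rw [if_neg h]
      rcases ih w with ⟨hm, hw, hall⟩
      refine ⟨?_, hw, ?_⟩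
      · rcases hm with hm | hm
        · exact Or.inl hm
        · exact Or.inr (Or.inr hm)
      · rintro g (rfl | hg)
        · omega
        · exact hall g hg

theorem fold_congr (r1 r2 : String → Int) (S : List String) (l : List String) (w : String)
    (hw : w ∈ S) (hl : ∀ x ∈ l, x ∈ S) (hr : ∀ x ∈ S, r1 x = r2 x) :
    l.foldl (fun w g => if r1 w < r1 g then g else w) w =
      l.foldl (fun w g => if r2 w < r2 g then g else w) w := by
  induction l generalizing w with
  | nil => rfl
  | cons a t ih =>
    have ha : a ∈ S := hl a (List.mem_cons_self ..)
    simp only [List.foldl_cons, hr w hw, hr a ha]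
    split
    · exact ih a ha (fun x hx => hl x (List.mem_cons_of_mem _ hx))
    · exact ih w hw (fun x hx => hl x (List.mem_cons_of_mem _ hx))

theorem core (ks : List String) (g0 : String) (gs : List String)
    (hsub : ∀ g ∈ g0 :: gs, g ∈ ks) :
    (g0 :: gs).foldl
        (fun w g => if (rankDict ks).getD w 0 < (rankDict ks).getD g 0 then g else w) g0 =
      (ks.reverse.find? (fun k => decide (k ∈ g0 :: gs))).getD g0 := by
  induction ks using List.reverseRecOn with
  | nil => exact absurd (hsub g0 (List.mem_cons_self ..)) (List.not_mem_nil)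
  | append_singleton ks k ih =>
    rw [List.reverse_append, List.reverse_singleton, List.singleton_append, List.find?_cons]
    by_cases hk : k ∈ g0 :: gs
    · rw [show decide (k ∈ g0 :: gs) = true by simpa using hk]
      simp only [Option.getD_some]
      -- the fold result has maximal rank; k has the strictly largest rank in ks ++ [k]
      set r : String → Int := fun x => (rankDict (ks ++ [k])).getD x 0 with hr
      have step0 : (g0 :: gs).foldl (fun w g => if r w < r g then g else w) g0
          = gs.foldl (fun w g => if r w < r g then g else w) g0 := by
        simp [List.foldl_cons]
      rw [step0]
      set res := gs.foldl (fun w g => if r w < r g then g else w) g0 with hres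
      rcases fold_invariant r gs g0 with ⟨hm, hw, hall⟩
      have hresmem : res ∈ g0 :: gs := by
        rcases hm with h | h
        · exact h ▸ List.mem_cons_self ..
        · exact List.mem_cons_of_mem _ h
      have hkr : r k ≤ r res := by
        rcases List.mem_cons.1 hk with heq | h
        · rw [heq]; exact hw
        · exact hall _ h
      have hrk : r k = (ks.length : Int) := by
        simp [hr, rankDict_append, PySem.Dict.getD_insert]
      by_contra hne
      have hne : res ≠ k := hne
      have hresks : res ∈ ks := by
        rcases List.mem_append.1 (hsub res hresmem) with h | h
        · exact h
        · simp at h; exact absurd h hne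
      have hc : (rankDict ks).contains res = true := by
        rw [contains_rankDict]; simpa using hresks
      rw [PySem.Dict.contains_eq_isSome_get?] at hc
      obtain ⟨i, hi⟩ := Option.isSome_iff_exists.1 hc
      have hlt := get?_rankDict_lt ks res i hi
      have : r res = i := by
        simp only [hr, rankDict_append, PySem.Dict.getD_eq_get?_getD]
        rw [PySem.Dict.get?_insert, if_neg hne, hi]
        rfl
      omega
    · rw [show decide (k ∈ g0 :: gs) = false by simpa using hk]
      have hsub' : ∀ g ∈ g0 :: gs, g ∈ ks := by
        intro g hg
        rcases List.mem_append.1 (hsub g hg) with h | h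
        · exact h
        · simp at h; subst h; exact absurd hg hk
      rw [← ih hsub']
      exact fold_congr _ _ (g0 :: gs) (g0 :: gs) g0 (List.mem_cons_self ..) (fun x hx => hx)
        (fun x hx => by
          have hxk : x ≠ k := fun h => hk (h ▸ hx)
          simp [rankDict_append, PySem.Dict.getD_insert, hxk])

-- ===== VERDICT (by name: the statement is the Claim_ definition above) =====
theorem get_worst_grade_py_spec : Claim_equal_get_worst_grade_py := by
  intro gsk grades _ hpre
  unfold Spec_get_worst_grade_py get_worst_grade_py get_worst_grade_py_alt
  cases gsk with
  | none => rfl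
  | some ks =>
    have hnil : grades ≠ [] := by
      rcases hpre with h | h
      · exact absurd h (by simp)
      · exact h
    obtain ⟨g0, gs, rfl⟩ := List.exists_cons_of_ne_nil hnil
    simp only
    by_cases hval : ∀ g ∈ g0 :: gs, g ∈ ks
    · have hA : (g0 :: gs).any (fun g => !((rankDict ks).contains g)) = false := by
        simp only [List.any_eq_false, Bool.not_eq_true', contains_rankDict]
        intro g hg
        simp [hval g hg]
      have hB : PySem.Set.issubset (PySem.Set.ofList (g0 :: gs)) (PySem.Set.ofList ks) = true := by
        rw [PySem.Set.issubset_iff]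
        intro x hx
        exact (PySem.Set.mem_ofList _ _).2 (hval x ((PySem.Set.mem_ofList _ _).1 hx))
      rw [hA, hB]
      simp only [Bool.not_true, Bool.false_eq_true, if_false, List.headD_cons]
      have hpred : (fun k => PySem.Set.contains (PySem.Set.ofList (g0 :: gs)) k)
          = (fun k => decide (k ∈ g0 :: gs)) := by
        funext k
        by_cases hk : k ∈ g0 :: gs
        · simp [hk]
        · have : ¬ k ∈ PySem.Set.ofList (g0 :: gs) := fun h => hk ((PySem.Set.mem_ofList _ _).1 h)
          simp only [hk, decide_false]
          exact Bool.not_eq_true _ ▸ (fun h => this ((PySem.Set.contains_iff _ _).1 h))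
      rw [hpred, core ks g0 gs hval]
      cases h : ks.reverse.find? (fun k => decide (k ∈ g0 :: gs)) with
      | none => simp
      | some k => simp
    · have hA : (g0 :: gs).any (fun g => !((rankDict ks).contains g)) = true := by
        push Not at hval
        obtain ⟨g, hg, hgk⟩ := hval
        refine List.any_eq_true.2 ⟨g, hg, ?_⟩
        simp [contains_rankDict, hgk]
      have hB : PySem.Set.issubset (PySem.Set.ofList (g0 :: gs)) (PySem.Set.ofList ks) = false := by
        rw [Bool.eq_false_iff]
        intro h
        exact hval fun g hg => (PySem.Set.mem_ofList _ _).1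
          (((PySem.Set.issubset_iff _ _).1 h) g ((PySem.Set.mem_ofList _ _).2 hg))
      rw [hA, hB]
      rfl
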